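-- pv_equiv track=rewrite | github.com/jgarr0/DES-Encryption | text.py | modifyLength
-- ===== SOURCE A (Python) =====
-- def modifyLength(inputString, length):
--     # get length of input
--     inputLength = len(inputString)
--     lengthDiff = length - inputLength
--     # if negative difference, trim input
--     if(lengthDiff < 0):
--         return inputString[0:length]
--     # if positive difference, pad input
--     elif(lengthDiff > 0):
--         for i in range(0, lengthDiff):
--             inputString += '0'
--         return inputString
--     # no modification necessary if string length = desired length
--     else:
--         return inputString
-- ===== SOURCE B (Python) =====
-- def modifyLength(inputString, length):
--     # one closed-form expression: pad then slice (padding is '' when not needed)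
--     return (inputString + '0' * (length - len(inputString)))[0:length]
-- ===== Notes on version B (the rewrite author's own statement) =====
-- stated objective: simpler
-- what changed: Replaced the three-branch trim/pad-loop logic with a single branch-free closed-form expression: unconditionally append '0' * (length - len) (empty when non-positive) and slice [0:length].
import Mathlib
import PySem

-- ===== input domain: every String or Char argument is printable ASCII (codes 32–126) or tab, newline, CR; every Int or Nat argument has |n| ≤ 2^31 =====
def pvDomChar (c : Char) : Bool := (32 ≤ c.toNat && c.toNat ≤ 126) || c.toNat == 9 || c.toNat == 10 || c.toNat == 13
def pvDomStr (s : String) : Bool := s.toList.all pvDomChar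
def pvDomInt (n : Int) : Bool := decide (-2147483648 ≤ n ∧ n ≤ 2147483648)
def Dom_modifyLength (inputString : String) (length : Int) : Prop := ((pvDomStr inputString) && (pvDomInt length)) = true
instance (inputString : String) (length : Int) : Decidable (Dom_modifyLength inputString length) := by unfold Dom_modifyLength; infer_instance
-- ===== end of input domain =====

-- B replaces A's three-branch trim/pad-loop logic with one branch-free pad-then-slice expression (objective: simpler).

-- ===== PORT A =====
def modifyLength (inputString : String) (length : Int) : String :=
  let inputLength : Int := PySem.Str.len inputString
  let lengthDiff : Int := length - inputLength
  if lengthDiff < 0 then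
    String.ofList (PySem.List.slice inputString.toList (some 0) (some length))
  else if lengthDiff > 0 then
    -- for i in range(0, lengthDiff): inputString += '0'
    String.ofList ((PySem.List.pyRange 0 lengthDiff 1).foldl
      (fun acc _ => acc ++ ['0']) inputString.toList)
  else
    inputString

-- ===== PORT B =====
def modifyLength_alt (inputString : String) (length : Int) : String :=
  String.ofList (PySem.List.slice
    (inputString.toList ++ List.replicate (length - PySem.Str.len inputString).toNat '0')
    (some 0) (some length))

-- ===== PRECONDITION & SPEC =====
def Spec_modifyLength (inputString : String) (length : Int) (out : String) : Prop := out = modifyLength_alt inputString length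
instance (inputString : String) (length : Int) (out : String) : Decidable (Spec_modifyLength inputString length out) := by unfold Spec_modifyLength; infer_instance

-- ===== CLAIM (what is proved, stated in full; the proofs are below) =====
def Claim_equal_modifyLength : Prop := ∀ (inputString : String) (length : Int), Dom_modifyLength inputString length → Spec_modifyLength inputString length (modifyLength inputString length)

-- ===== LEMMAS AND PROOFS =====
-- A's padding loop appends '0' once per iteration: it is init ++ replicate d '0'.
theorem foldl_append_zero (d : Nat) (init : List Char) :
    (PySem.List.pyRange 0 (d : Int) 1).foldl (fun acc _ => acc ++ ['0']) init
      = init ++ List.replicate d '0' := by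
  induction d generalizing init with
  | zero => simp [PySem.List.pyRange_one_eq_nil]
  | succ k ih =>
      rw [show ((k + 1 : Nat) : Int) = (k : Int) + 1 by push_cast; ring,
          PySem.List.pyRange_one_succ_right (by exact_mod_cast Nat.zero_le k)]
      simp [List.foldl_append, ih, List.replicate_succ']

theorem slice_full (xs : List Char) :
    PySem.List.slice xs (some 0) (some (xs.length : Int)) = xs := by
  simp [PySem.List.slice_to]

theorem modifyLength_spec' (inputString : String) (length : Int) :
    modifyLength inputString length = modifyLength_alt inputString length := by
  unfold modifyLength modifyLength_alt
  simp only [PySem.Str.len_eq]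
  set s := inputString.toList with hs
  by_cases h1 : length - (s.length : Int) < 0
  · -- trim: the padding is empty on both sides
    have ht : (length - (s.length : Int)).toNat = 0 := by omega
    simp [h1, ht]
  · by_cases h2 : length - (s.length : Int) > 0
    · -- pad: A's loop builds s ++ replicate d '0'; B slices the full padded list
      obtain ⟨d, hd⟩ : ∃ d : Nat, length = (s.length : Int) + d :=
        ⟨(length - (s.length : Int)).toNat, by omega⟩
      subst hd
      rw [if_neg h1, if_pos h2,
          show ((s.length : Int) + d - (s.length : Int)) = ((d : Nat) : Int) by ring]
      simp only [Int.toNat_natCast, foldl_append_zero]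
      rw [show ((s.length : Int) + d) = (((s ++ List.replicate d '0').length : Nat) : Int) by
            simp, slice_full]
    · -- equal length: B slices the whole (unpadded) string back out
      have h0 : length = (s.length : Int) := by omega
      have ht : (length - (s.length : Int)).toNat = 0 := by omega
      rw [if_neg h1, if_neg h2, ht]
      simp only [List.replicate_zero, List.append_nil]
      rw [h0, slice_full, hs]
      simp

-- ===== VERDICT (by name: the statement is the Claim_ definition above) =====
theorem modifyLength_spec : Claim_equal_modifyLength := by
  intro s n _
  exact modifyLength_spec' s n
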